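-- pv_equiv track=rewrite | github.com/hoelzl/clm | src/clm/data_sinks/editscript_data_sink.py | get_newlines_and_indent
-- ===== SOURCE A (Python) =====
-- def get_newlines_and_indent(
--     source: str, target: str, i1: int, i2: int, j1: int
-- ) -> tuple[int, int]:
--     # We have already performed the edits on the first part of the string,
--     # therefore we need to splice the second half of source onto the
--     # part of the target that represents the processed part of the result.
--     edit_len = i2 - i1
--     j2 = j1 + edit_len
--     edit_source = target[:j1] + source[i1:]
--     newlines = edit_source[j1:j2].count("\n")
--     if newlines == 0:
--         return 0, edit_len
--     newline_before_j1 = edit_source.rfind("\n", 0, j1)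
--     if newline_before_j1 == -1:
--         start_index = 0
--         j1_indent = j1
--     else:
--         start_index = newline_before_j1 + 1
--         j1_indent = j1 - newline_before_j1 - 1
--     newline_after_j2 = edit_source.find("\n", j2)
--     if newline_after_j2 == -1:
--         end_index = len(edit_source)
--     else:
--         end_index = newline_after_j2
--     line_lengths = [
--         len(line) for line in edit_source[start_index:end_index].split("\n")
--     ]
--     indent_after_moving_down = min(j1_indent, *line_lengths)
--     last_newline = edit_source.rfind("\n", 0, j2)
--     target_indent = j2 - last_newline - 1
--     required_indent = target_indent - indent_after_moving_down
--     return newlines, required_indent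
-- ===== SOURCE B (Python) =====
-- def get_newlines_and_indent(source, target, i1, i2, j1):
--     edit_len = i2 - i1
--     j2 = j1 + edit_len
--     edit_source = target[:j1] + source[i1:]
--     # Normalise the window bounds the way slicing does, then derive everything
--     # from the list of newline positions gathered in one scan.
--     lo, hi, _ = slice(j1, j2).indices(len(edit_source))
--     nls = [k for k, c in enumerate(edit_source) if c == "\n"]
--     window = [k for k in nls if lo <= k < hi]
--     newlines = len(window)
--     if newlines == 0:
--         return 0, edit_len
--     before = [k for k in nls if k < lo]
--     if before:
--         start_index = before[-1] + 1
--         j1_indent = j1 - before[-1] - 1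
--     else:
--         start_index = 0
--         j1_indent = j1
--     after = [k for k in nls if k >= hi]
--     end_index = after[0] if after else len(edit_source)
--     indent = j1_indent
--     prev = start_index
--     for k in nls:
--         if start_index <= k < end_index:
--             indent = min(indent, k - prev)
--             prev = k + 1
--     indent = min(indent, end_index - prev)
--     last_newline = window[-1]
--     return newlines, j2 - last_newline - 1 - indent
-- ===== Notes on version B (the rewrite author's own statement) =====
-- stated objective: alternative
-- what changed: B makes one scan that records every newline position of the spliced string and derives the window count, the enclosing line boundaries and the minimum spanning-line length by arithmetic on that index list (window bounds normalised once with slice.indices), instead of A's separate count/rfind/find/split string passes.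
import Mathlib
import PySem

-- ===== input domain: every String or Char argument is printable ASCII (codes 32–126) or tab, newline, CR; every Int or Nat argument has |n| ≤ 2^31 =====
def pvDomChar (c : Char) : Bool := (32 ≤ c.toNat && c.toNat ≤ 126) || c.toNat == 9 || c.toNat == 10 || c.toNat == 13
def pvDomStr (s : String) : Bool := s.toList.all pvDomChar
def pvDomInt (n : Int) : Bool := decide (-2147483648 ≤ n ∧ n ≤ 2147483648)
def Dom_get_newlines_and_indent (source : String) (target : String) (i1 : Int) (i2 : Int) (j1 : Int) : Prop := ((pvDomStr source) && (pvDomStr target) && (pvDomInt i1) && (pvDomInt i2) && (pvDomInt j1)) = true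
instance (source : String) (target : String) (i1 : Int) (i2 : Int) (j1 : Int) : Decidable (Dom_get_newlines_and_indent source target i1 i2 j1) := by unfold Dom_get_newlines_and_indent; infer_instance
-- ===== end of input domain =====

-- B replaces A's separate count/rfind/find/split string passes by one scan collecting
-- the newline positions and arithmetic on that list (objective: alternative).

-- ===== PORT A =====
def get_newlines_and_indent (source : String) (target : String) (i1 : Int) (i2 : Int) (j1 : Int) : Int × Int :=
  let edit_len := i2 - i1
  let j2 := j1 + edit_len
  let edit_source := PySem.List.slice target.toList none (some j1) ++
                     PySem.List.slice source.toList (some i1) none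
  let newlines : Int :=
    (PySem.Chars.count (PySem.List.slice edit_source (some j1) (some j2)) ['\n'] : Int)
  if newlines = 0 then (0, edit_len) else
  let newline_before_j1 := PySem.Chars.rfindFrom edit_source ['\n'] 0 (some j1)
  let start_index : Int := if newline_before_j1 = -1 then 0 else newline_before_j1 + 1
  let j1_indent : Int := if newline_before_j1 = -1 then j1 else j1 - newline_before_j1 - 1
  let newline_after_j2 := PySem.Chars.findFrom edit_source ['\n'] j2 none
  let end_index : Int := if newline_after_j2 = -1 then (edit_source.length : Int) else newline_after_j2
  let line_lengths : List Int :=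
    (PySem.Chars.splitOn (PySem.List.slice edit_source (some start_index) (some end_index)) ['\n']).map
      (fun line => (line.length : Int))
  let indent_after_moving_down := line_lengths.foldl min j1_indent
  let last_newline := PySem.Chars.rfindFrom edit_source ['\n'] 0 (some j2)
  let target_indent := j2 - last_newline - 1
  let required_indent := target_indent - indent_after_moving_down
  (newlines, required_indent)

-- ===== PORT B =====
def get_newlines_and_indent_alt (source : String) (target : String) (i1 : Int) (i2 : Int) (j1 : Int) : Int × Int :=
  let edit_len := i2 - i1
  let j2 := j1 + edit_len
  let edit_source := PySem.List.slice target.toList none (some j1) ++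
                     PySem.List.slice source.toList (some i1) none
  -- lo, hi, _ = slice(j1, j2).indices(len(edit_source)); for step 1 each bound is
  -- exactly PySem.List.clampIdx (CPython slice-bound normalisation)
  let lo : Int := (PySem.List.clampIdx edit_source.length j1 : Nat)
  let hi : Int := (PySem.List.clampIdx edit_source.length j2 : Nat)
  let nls : List Int :=
    ((PySem.List.enumerate edit_source 0).filter (fun p => p.2 == '\n')).map (fun p => p.1)
  let window := nls.filter (fun k => decide (lo ≤ k) && decide (k < hi))
  let newlines : Int := (window.length : Int)
  if newlines = 0 then (0, edit_len) else
  let before := nls.filter (fun k => decide (k < lo))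
  let sj : Int × Int := match before.getLast? with
    | some nb => (nb + 1, j1 - nb - 1)
    | none => (0, j1)
  let start_index := sj.1
  let j1_indent := sj.2
  let after := nls.filter (fun k => decide (hi ≤ k))
  let end_index : Int := match after.head? with
    | some na => na
    | none => (edit_source.length : Int)
  let ip : Int × Int := nls.foldl
    (fun ip k => if decide (start_index ≤ k) && decide (k < end_index)
                 then (min ip.1 (k - ip.2), k + 1) else ip) (j1_indent, start_index)
  let indent := min ip.1 (end_index - ip.2)
  let last_newline := PySem.List.pyGetD window (-1) 0
  (newlines, j2 - last_newline - 1 - indent)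

-- ===== PRECONDITION & SPEC =====
def Spec_get_newlines_and_indent (source : String) (target : String) (i1 : Int) (i2 : Int) (j1 : Int) (out : Int × Int) : Prop := out = get_newlines_and_indent_alt source target i1 i2 j1
instance (source : String) (target : String) (i1 : Int) (i2 : Int) (j1 : Int) (out : Int × Int) : Decidable (Spec_get_newlines_and_indent source target i1 i2 j1 out) := by unfold Spec_get_newlines_and_indent; infer_instance

-- ===== CLAIM (what is proved, stated in full; the proofs are below) =====
def Claim_equal_get_newlines_and_indent : Prop := ∀ (source : String) (target : String) (i1 : Int) (i2 : Int) (j1 : Int), Dom_get_newlines_and_indent source target i1 i2 j1 → Spec_get_newlines_and_indent source target i1 i2 j1 (get_newlines_and_indent source target i1 i2 j1)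

-- ===== LEMMAS AND PROOFS =====

-- The newline positions of a char list, in increasing order.
def nlIdxs : List Char → List Nat
  | [] => []
  | x :: t => (if x = '\n' then [0] else []) ++ (nlIdxs t).map (· + 1)

-- Common normal form both ports are reduced to (Nat-indexed, over nlIdxs).
def pvGStep : Int × Int → Int → Int × Int := fun ip k => (min ip.1 (k - ip.2), k + 1)

def pvCore (es : List Char) (j1 j2 elen : Int) (lon hin : Nat) : Int × Int :=
  let K := nlIdxs es
  let W := K.filter (fun k => decide (lon ≤ k) && decide (k < hin))
  if W.length = 0 then (0, elen) else
  let sj : Nat × Int := match (K.filter (fun k => decide (k < lon))).getLast? with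
    | some nb => (nb + 1, j1 - nb - 1)
    | none => (0, j1)
  let eIdx : Nat := match (K.filter (fun k => decide (hin ≤ k))).head? with
    | some na => na
    | none => es.length
  let ip : Int × Int := List.foldl pvGStep (sj.2, (sj.1 : Int))
    ((K.filter (fun k => decide (sj.1 ≤ k) && decide (k < eIdx))).map (Nat.cast : Nat → Int))
  let indent := min ip.1 ((eIdx : Int) - ip.2)
  let lastN : Nat := W.getLast?.getD 0
  ((W.length : Int), j2 - lastN - 1 - indent)

theorem mem_nlIdxs (l : List Char) (k : Nat) : k ∈ nlIdxs l ↔ l[k]? = some '\n' := by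
  induction l generalizing k with
  | nil => simp [nlIdxs]
  | cons x t ih =>
    cases k with
    | zero =>
      simp only [nlIdxs, List.mem_append, List.mem_map, List.getElem?_cons_zero]
      constructor
      · rintro (h | ⟨a, _, ha⟩)
        · split_ifs at h with hx
          · simp_all
          · simp at h
        · omega
      · intro h
        left
        have hx : x = '\n' := by simpa using h
        simp [hx]
    | succ k =>
      simp only [nlIdxs, List.mem_append, List.mem_map, List.getElem?_cons_succ, ← ih]
      constructor
      · rintro (h | ⟨a, ha, hak⟩)
        · split_ifs at h <;> simp_all
        · have : a = k := by omega
          subst this; exact ha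
      · intro h; right; exact ⟨k, h, rfl⟩

theorem pairwise_nlIdxs (l : List Char) : (nlIdxs l).Pairwise (· < ·) := by
  induction l with
  | nil => simp [nlIdxs]
  | cons x t ih =>
    simp only [nlIdxs, List.pairwise_append]
    refine ⟨?_, List.Pairwise.map _ (by omega) ih, ?_⟩
    · split_ifs <;> simp
    · intro a ha b hb
      split_ifs at ha <;> simp_all
      omega

theorem nlIdxs_take (l : List Char) (m : Nat) :
    nlIdxs (l.take m) = (nlIdxs l).filter (fun k => decide (k < m)) := by
  induction l generalizing m with
  | nil => simp [nlIdxs]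
  | cons x t ih =>
    cases m with
    | zero =>
      simp only [List.take_zero, nlIdxs, List.filter_append, List.filter_map]
      have h1 : List.filter (fun k => decide (k < 0)) (if x = '\n' then [0] else []) = [] := by
        split_ifs <;> simp
      have h2 : List.filter ((fun k => decide (k < 0)) ∘ fun x => x + 1) (nlIdxs t) = [] := by
        simp
      rw [h1, h2]; rfl
    | succ m =>
      simp only [List.take_succ_cons, nlIdxs, ih, List.filter_append, List.filter_map]
      congr 1
      · split_ifs <;> simp
      · congr 1
        apply List.filter_congr
        intro a _
        simp
    
theorem nlIdxs_drop (l : List Char) (m : Nat) :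
    nlIdxs (l.drop m) = ((nlIdxs l).filter (fun k => decide (m ≤ k))).map (· - m) := by
  induction l generalizing m with
  | nil => simp [nlIdxs]
  | cons x t ih =>
    cases m with
    | zero => simp [nlIdxs]
    | succ m =>
      simp only [List.drop_succ_cons, nlIdxs, ih, List.filter_append, List.map_append,
        List.filter_map, List.map_map]
      have h0 : List.map (fun x => x - (m+1)) (List.filter (fun k => decide (m+1 ≤ k)) (if x = '\n' then [0] else [])) = [] := by
        split_ifs <;> simp
      rw [h0, List.nil_append]
      have hf : List.filter ((fun k => decide (m + 1 ≤ k)) ∘ fun x => x + 1) (nlIdxs t)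
          = List.filter (fun k => decide (m ≤ k)) (nlIdxs t) :=
        List.filter_congr (by intro a _; simp)
      rw [hf]
      apply List.map_congr_left
      intro a _
      simp

theorem count_go_char (l : List Char) (fuel acc : Nat) (h : l.length ≤ fuel) :
    PySem.Chars.count.go ['\n'] fuel l acc = acc + (nlIdxs l).length := by
  induction fuel generalizing l acc with
  | zero =>
    have : l = [] := by cases l <;> simp_all
    subst this
    simp [PySem.Chars.count.go, nlIdxs]
  | succ fuel ih =>
    cases l with
    | nil => simp [PySem.Chars.count.go, nlIdxs]
    | cons x t =>
      rw [PySem.Chars.count.go]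
      by_cases hx : x = '\n'
      · rw [if_pos (by simp [List.isPrefixOf, hx])]
        simp only [List.length_cons] at h
        simp [ih t (acc+1) (by omega), nlIdxs, hx]
        omega
      · rw [if_neg (by simp [List.isPrefixOf]; exact fun hh => (hx hh.symm).elim)]
        simp only [List.length_cons] at h
        simp [ih t acc (by omega), nlIdxs, hx]

theorem count_char (l : List Char) : PySem.Chars.count l ['\n'] = (nlIdxs l).length := by
  rw [PySem.Chars.count, if_neg (by simp)]
  simpa using count_go_char l l.length 0 le_rfl

theorem find_go_char (l : List Char) (k : Nat) :
    PySem.Chars.find.go ['\n'] l k = (match (nlIdxs l).head? with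
      | some j => ((k : Int) + j)
      | none => -1) := by
  induction l generalizing k with
  | nil => simp [PySem.Chars.find.go, nlIdxs]
  | cons x t ih =>
    rw [PySem.Chars.find.go]
    by_cases hx : x = '\n'
    · rw [if_pos (by simp [List.isPrefixOf, hx])]
      simp [nlIdxs, hx]
    · rw [if_neg (by simp [List.isPrefixOf]; exact fun hh => (hx hh.symm).elim)]
      rw [ih]
      simp only [nlIdxs, if_neg hx, List.nil_append, List.head?_map]
      cases (nlIdxs t).head? with
      | none => simp
      | some j =>
        simp
        ring

theorem find_char (l : List Char) :
    PySem.Chars.find l ['\n'] = (match (nlIdxs l).head? with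
      | some j => (j : Int)
      | none => -1) := by
  rw [PySem.Chars.find, find_go_char]
  cases (nlIdxs l).head? with
  | none => rfl
  | some j => simp

theorem getLast?_cons_of_ne_nil {α : Type} (a : α) {l : List α} (h : l ≠ []) :
    (a :: l).getLast? = l.getLast? := by
  cases l with
  | nil => exact absurd rfl h
  | cons b t => simp [List.getLast?_cons_cons]

theorem filter_le_getLast_of_mem {L : List Nat} (hL : L.Pairwise (· < ·)) {m : Nat} (hm : m ∈ L) :
    (L.filter (fun k => decide (k ≤ m))).getLast? = some m := by
  induction L with
  | nil => simp at hm
  | cons h t ih =>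
    rw [List.pairwise_cons] at hL
    rcases List.mem_cons.mp hm with rfl | hmt
    · have ht : t.filter (fun k => decide (k ≤ m)) = [] := by
        rw [List.filter_eq_nil_iff]
        intro a ha
        have := hL.1 a ha
        simp; omega
      simp [ht]
    · have hlt : h < m := hL.1 m hmt
      have hrec := ih hL.2 hmt
      have hne : t.filter (fun k => decide (k ≤ m)) ≠ [] := by
        intro hnil; rw [hnil] at hrec; simp at hrec
      rw [List.filter_cons, if_pos (by simp; omega), getLast?_cons_of_ne_nil _ hne, hrec]

theorem filter_le_of_not_mem {L : List Nat} {m : Nat} (hm : (m+1) ∉ L) :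
    L.filter (fun k => decide (k ≤ m+1)) = L.filter (fun k => decide (k ≤ m)) := by
  apply List.filter_congr
  intro a ha
  simp only [decide_eq_decide]
  constructor
  · intro h
    rcases Nat.lt_or_ge a (m+1) with h' | h'
    · omega
    · have : a = m+1 := by omega
      subst this
      exact absurd ha hm
  · omega

theorem isPrefixOf_nl_drop (l : List Char) (j : Nat) :
    List.isPrefixOf ['\n'] (l.drop j) = true ↔ l[j]? = some '\n' := by
  rw [← List.head?_drop]
  cases l.drop j with
  | nil => simp [List.isPrefixOf]
  | cons x t =>
    simp [List.isPrefixOf]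
    constructor
    · intro hh; simp [hh.symm]
    · intro hh; simp_all

theorem rfind_go_char (l : List Char) (m : Nat) :
    PySem.Chars.rfind.go l ['\n'] m = (match ((nlIdxs l).filter (fun k => decide (k ≤ m))).getLast? with
      | some k => (k : Int)
      | none => -1) := by
  induction m with
  | zero =>
    rw [PySem.Chars.rfind.go]
    by_cases h0 : l[0]? = some '\n'
    · have hpre : List.isPrefixOf ['\n'] l = true := by
        have := (isPrefixOf_nl_drop l 0).mpr h0
        simpa using this
      rw [if_pos hpre, filter_le_getLast_of_mem (pairwise_nlIdxs l) ((mem_nlIdxs l 0).mpr h0)]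
      rfl
    · have hpre : ¬ List.isPrefixOf ['\n'] l = true := by
        intro hc
        exact h0 ((isPrefixOf_nl_drop l 0).mp (by simpa using hc))
      have hmem : 0 ∉ nlIdxs l := fun hc => h0 ((mem_nlIdxs l 0).mp hc)
      have hf : (nlIdxs l).filter (fun k => decide (k ≤ 0)) = [] := by
        rw [List.filter_eq_nil_iff]
        intro a ha
        simp only [decide_eq_true_eq]
        intro hle
        have : a = 0 := by omega
        exact hmem (this ▸ ha)
      rw [if_neg hpre, hf]
      rfl
  | succ m ih =>
    rw [PySem.Chars.rfind.go]
    by_cases h0 : l[m+1]? = some '\n'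
    · rw [if_pos ((isPrefixOf_nl_drop l (m+1)).mpr h0),
        filter_le_getLast_of_mem (pairwise_nlIdxs l) ((mem_nlIdxs l (m+1)).mpr h0)]
    · have hmem : (m+1) ∉ nlIdxs l := fun hc => h0 ((mem_nlIdxs l (m+1)).mp hc)
      rw [if_neg (fun hc => h0 ((isPrefixOf_nl_drop l (m+1)).mp hc)), ih,
        filter_le_of_not_mem hmem]

theorem rfind_char (l : List Char) :
    PySem.Chars.rfind l ['\n'] = (match (nlIdxs l).getLast? with
      | some k => (k : Int)
      | none => -1) := by
  rw [PySem.Chars.rfind, rfind_go_char]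
  have hf : (nlIdxs l).filter (fun k => decide (k ≤ l.length)) = nlIdxs l := by
    rw [List.filter_eq_self]
    intro a ha
    have : a < l.length := by
      have := (mem_nlIdxs l a).mp ha
      exact List.getElem?_eq_some_iff.mp this |>.1
    simp; omega
  rw [hf]

-- sorted split of a filter below b at a ≤ b
theorem filter_lt_split {L : List Nat} (hL : L.Pairwise (· < ·)) {a b : Nat} (hab : a ≤ b) :
    L.filter (fun k => decide (k < b)) =
      L.filter (fun k => decide (k < a)) ++ L.filter (fun k => decide (a ≤ k) && decide (k < b)) := by
  induction L with
  | nil => simp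
  | cons h t ih =>
    rw [List.pairwise_cons] at hL
    by_cases hha : h < a
    · rw [List.filter_cons, List.filter_cons, List.filter_cons,
        if_pos (by simp; omega), if_pos (by simp; omega), if_neg (by simp; omega),
        ih hL.2, List.cons_append]
    · have hta : t.filter (fun k => decide (k < a)) = [] := by
        rw [List.filter_eq_nil_iff]
        intro x hx
        have := hL.1 x hx
        simp; omega
      have hha' : (h :: t).filter (fun k => decide (k < a)) = [] := by
        rw [List.filter_cons, if_neg (by simp; omega), hta]
      rw [hha', List.nil_append]
      apply List.filter_congr
      intro x hx
      rcases List.mem_cons.mp hx with rfl | hxt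
      · simp; omega
      · have := hL.1 x hxt
        simp; omega

def pvConsHead (a : Nat) : List Nat → List Nat
  | [] => [a]
  | h :: r => (a + h) :: r

def pvLineLens : List Char → List Nat
  | [] => [0]
  | x :: t => if x = '\n' then 0 :: pvLineLens t else pvConsHead 1 (pvLineLens t)

theorem pvLineLens_ne_nil (l : List Char) : pvLineLens l ≠ [] := by
  cases l with
  | nil => simp [pvLineLens]
  | cons x t =>
    simp only [pvLineLens]
    split_ifs
    · simp
    · cases hv : pvLineLens t <;> simp [pvConsHead]

theorem pvConsHead_zero {L : List Nat} (h : L ≠ []) : pvConsHead 0 L = L := by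
  cases L with
  | nil => exact absurd rfl h
  | cons a r => simp [pvConsHead]

theorem pvConsHead_consHead (a b : Nat) (L : List Nat) :
    pvConsHead a (pvConsHead b L) = pvConsHead (a + b) L := by
  cases L <;> simp [pvConsHead, Nat.add_assoc]

theorem splitOn_go_char (l : List Char) (cur : List Char) (acc : List (List Char)) (fuel : Nat)
    (h : l.length ≤ fuel) :
    (PySem.Chars.splitOn.go ['\n'] fuel l cur acc).map List.length =
      acc.reverse.map List.length ++ pvConsHead cur.length (pvLineLens l) := by
  induction fuel generalizing l cur acc with
  | zero =>
    have : l = [] := by cases l <;> simp_all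
    subst this
    rw [PySem.Chars.splitOn.go]
    simp [pvLineLens, pvConsHead]
  | succ fuel ih =>
    cases l with
    | nil =>
      rw [PySem.Chars.splitOn.go]
      all_goals simp [pvLineLens, pvConsHead]
    | cons x t =>
      rw [PySem.Chars.splitOn.go]
      simp only [List.length_cons] at h
      by_cases hx : x = '\n'
      · rw [if_pos (by simp [List.isPrefixOf, hx])]
        rw [show List.drop ['\n'].length (x :: t) = t by simp]
        rw [ih t [] (cur.reverse :: acc) (by omega)]
        rw [show List.length ([] : List Char) = 0 from rfl,
          pvConsHead_zero (pvLineLens_ne_nil t)]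
        simp [pvLineLens, hx, pvConsHead]
      · rw [if_neg (by simp [List.isPrefixOf]; exact fun hh => (hx hh.symm).elim)]
        rw [ih t (x :: cur) acc (by omega)]
        simp [pvLineLens, hx, pvConsHead_consHead]

theorem splitOn_char (l : List Char) :
    (PySem.Chars.splitOn l ['\n']).map List.length = pvLineLens l := by
  rw [PySem.Chars.splitOn, splitOn_go_char l [] [] (l.length + 1) (by omega)]
  simp [pvConsHead_zero (pvLineLens_ne_nil l)]

theorem gstep_shift (ks : List Int) (ind p d : Int) :
    List.foldl pvGStep (ind, p + d) (ks.map (· + d)) =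
      ((List.foldl pvGStep (ind, p) ks).1, (List.foldl pvGStep (ind, p) ks).2 + d) := by
  induction ks generalizing ind p with
  | nil => simp
  | cons k ks ih =>
    simp only [List.map_cons, List.foldl_cons, pvGStep]
    rw [show k + d - (p + d) = k - p by ring, show k + d + 1 = (k + 1) + d by ring, ih]

theorem map_cast_shift (K : List Nat) :
    (K.map (fun x => x + 1)).map (Nat.cast : Nat → Int) =
      (K.map (Nat.cast : Nat → Int)).map (· + 1) := by
  rw [List.map_map, List.map_map]
  apply List.map_congr_left
  intro b _
  simp

theorem fold_min_lineLens (t : List Char) (ind : Int) (a : Nat) :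
    List.foldl min ind ((pvConsHead a (pvLineLens t)).map (Nat.cast : Nat → Int)) =
      min (List.foldl pvGStep (ind, -(a : Int)) ((nlIdxs t).map (Nat.cast : Nat → Int))).1
        ((t.length : Int) - (List.foldl pvGStep (ind, -(a : Int)) ((nlIdxs t).map (Nat.cast : Nat → Int))).2) := by
  induction t generalizing ind a with
  | nil =>
    simp [pvLineLens, pvConsHead, nlIdxs]
  | cons x r ih =>
    by_cases hx : x = '\n'
    · have hK : nlIdxs (x :: r) = 0 :: (nlIdxs r).map (fun x => x + 1) := by
        simp [nlIdxs, hx]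
      rw [hK]
      rw [show pvLineLens (x :: r) = 0 :: pvLineLens r by simp [pvLineLens, hx]]
      rw [show pvConsHead a (0 :: pvLineLens r) = a :: pvLineLens r by simp [pvConsHead]]
      simp only [List.map_cons, List.foldl_cons]
      rw [show pvGStep (ind, -(a : Int)) ((0 : Nat) : Int) = (min ind (a : Int), 1) by
        simp [pvGStep, sub_neg_eq_add]]
      rw [map_cast_shift,
        show ((min ind (a : Int), (1 : Int))) = ((min ind (a : Int), (0 : Int) + 1)) from by norm_num,
        gstep_shift]
      have hrec := ih (min ind (a : Int)) 0
      rw [pvConsHead_zero (pvLineLens_ne_nil r)] at hrec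
      simp only [Nat.cast_zero, neg_zero] at hrec
      rw [hrec]
      simp only [List.length_cons]
      push_cast
      ring_nf
    · have hK : nlIdxs (x :: r) = (nlIdxs r).map (fun x => x + 1) := by
        simp [nlIdxs, hx]
      rw [hK]
      rw [show pvLineLens (x :: r) = pvConsHead 1 (pvLineLens r) by simp [pvLineLens, hx]]
      rw [pvConsHead_consHead]
      rw [map_cast_shift, show -(a : Int) = -((a + 1 : Nat) : Int) + 1 from by push_cast; ring,
        gstep_shift]
      rw [ih ind (a + 1)]
      simp only [List.length_cons]
      push_cast
      ring_nf

theorem enum_filter_nl (l : List Char) (s : Int) :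
    ((PySem.List.enumerate l s).filter (fun p => p.2 == '\n')).map Prod.fst =
      (nlIdxs l).map (fun k : Nat => s + (k : Int)) := by
  induction l generalizing s with
  | nil => simp [nlIdxs]
  | cons x t ih =>
    rw [PySem.List.enumerate_cons, List.filter_cons]
    by_cases hx : x = '\n'
    · rw [if_pos (by simp [hx])]
      rw [List.map_cons, ih (s+1)]
      rw [show nlIdxs (x :: t) = 0 :: (nlIdxs t).map (fun x => x + 1) by simp [nlIdxs, hx]]
      rw [List.map_cons, List.map_map]
      simp only [Nat.cast_zero, add_zero]
      congr 1
      apply List.map_congr_left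
      intro b _
      simp
      ring
    · rw [if_neg (by simp [hx]), ih (s+1),
        show nlIdxs (x :: t) = (nlIdxs t).map (fun x => x + 1) by simp [nlIdxs, hx], List.map_map]
      apply List.map_congr_left
      intro b _
      simp
      ring

theorem pyGetD_neg_one (xs : List Int) (h : xs ≠ []) (d : Int) :
    PySem.List.pyGetD xs (-1) d = xs.getLast?.getD d := by
  have hlen : 1 ≤ xs.length := by
    cases xs with
    | nil => exact absurd rfl h
    | cons a t => simp
  rw [PySem.List.pyGetD, PySem.List.pyGet?, PySem.List.pyIdx?]
  rw [if_neg (by omega), if_pos (by omega)]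
  simp only [Option.bind_some]
  rw [show ((-(-1 : Int)).toNat) = 1 from rfl, List.getLast?_eq_getElem?]

-- cast-transport helpers for filters over nlIdxs
theorem filter_cast_range (K : List Nat) (a b : Nat) :
    (K.map (Nat.cast : Nat → Int)).filter (fun k => decide ((a : Int) ≤ k) && decide (k < (b : Int))) =
      (K.filter (fun k => decide (a ≤ k) && decide (k < b))).map (Nat.cast : Nat → Int) := by
  rw [List.filter_map]
  congr 1
  apply List.filter_congr
  intro x _
  simp

theorem filter_cast_lt (K : List Nat) (b : Nat) :
    (K.map (Nat.cast : Nat → Int)).filter (fun k => decide (k < (b : Int))) =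
      (K.filter (fun k => decide (k < b))).map (Nat.cast : Nat → Int) := by
  rw [List.filter_map]
  congr 1
  apply List.filter_congr
  intro x _
  simp

theorem filter_cast_ge (K : List Nat) (b : Nat) :
    (K.map (Nat.cast : Nat → Int)).filter (fun k => decide ((b : Int) ≤ k)) =
      (K.filter (fun k => decide (b ≤ k))).map (Nat.cast : Nat → Int) := by
  rw [List.filter_map]
  congr 1
  apply List.filter_congr
  intro x _
  simp

theorem optmap_cast_getD (o : Option Nat) :
    (o.map (Nat.cast : Nat → Int)).getD 0 = ((o.getD 0 : Nat) : Int) := by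
  cases o <;> simp

theorem natCast_ne_neg_one (n : Nat) : ¬ ((n : Int) = -1) := by
  intro hc
  have hge := Int.natCast_nonneg n
  rw [hc] at hge
  norm_num at hge

theorem seg_nlIdxs (es : List Char) (sN eN : Nat) (hse : sN ≤ eN) :
    nlIdxs (List.take (eN - sN) (List.drop sN es)) =
      ((nlIdxs es).filter (fun k => decide (sN ≤ k) && decide (k < eN))).map (· - sN) := by
  rw [nlIdxs_take, nlIdxs_drop, List.filter_map, List.filter_filter]
  congr 1
  apply List.filter_congr
  intro a _
  simp only [Function.comp_apply, ← Bool.decide_and, decide_eq_decide]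
  omega

theorem indent_eq (es : List Char) (sN eN : Nat) (ind : Int)
    (hse : sN ≤ eN) (hel : eN ≤ es.length) :
    List.foldl min ind
        ((PySem.Chars.splitOn (List.take (eN - sN) (List.drop sN es)) ['\n']).map
          (fun line => (line.length : Int))) =
      min (List.foldl pvGStep (ind, (sN : Int))
            (((nlIdxs es).filter (fun k => decide (sN ≤ k) && decide (k < eN))).map (Nat.cast : Nat → Int))).1
          ((eN : Int) - (List.foldl pvGStep (ind, (sN : Int))
            (((nlIdxs es).filter (fun k => decide (sN ≤ k) && decide (k < eN))).map (Nat.cast : Nat → Int))).2) := by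
  set seg := List.take (eN - sN) (List.drop sN es) with hseg
  have h1 : (PySem.Chars.splitOn seg ['\n']).map (fun line => ((line.length : Nat) : Int)) =
      ((PySem.Chars.splitOn seg ['\n']).map List.length).map (Nat.cast : Nat → Int) := by
    rw [List.map_map]
    rfl
  rw [h1, splitOn_char, ← pvConsHead_zero (pvLineLens_ne_nil seg), fold_min_lineLens]
  simp only [Nat.cast_zero, neg_zero]
  rw [hseg, seg_nlIdxs es sN eN hse]
  have h2 : (((nlIdxs es).filter (fun k => decide (sN ≤ k) && decide (k < eN))).map (· - sN)).map (Nat.cast : Nat → Int) =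
      (((nlIdxs es).filter (fun k => decide (sN ≤ k) && decide (k < eN))).map (Nat.cast : Nat → Int)).map
        (fun x => x + (-(sN : Int))) := by
    rw [List.map_map, List.map_map]
    apply List.map_congr_left
    intro a ha
    have hmem := List.of_mem_filter ha
    simp only [Bool.and_eq_true, decide_eq_true_eq] at hmem
    simp only [Function.comp_apply]
    omega
  rw [h2, show ((ind, (0 : Int))) = ((ind, (sN : Int) + (-(sN : Int)))) from by norm_num,
    gstep_shift]
  congr 1
  have hlen : seg.length = eN - sN := by
    rw [hseg]
    simp only [List.length_take, List.length_drop]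
    omega
  rw [hlen]
  have : ((eN - sN : Nat) : Int) = (eN : Int) - sN := by omega
  rw [this]
  ring

theorem rfindFrom_zero_clamp (es : List Char) (b : Int) :
    PySem.Chars.rfindFrom es ['\n'] 0 (some b) =
      ((nlIdxs (es.take (PySem.List.clampIdx es.length b))).getLast?).elim (-1 : Int)
        (fun k => (k : Int)) := by
  simp only [PySem.Chars.rfindFrom]
  rw [show (if (es.length : Int) < b then ((es.length : Int))
        else if b < 0 then (if b + ↑es.length < 0 then 0 else b + ↑es.length) else b)
      = ((PySem.List.clampIdx es.length b : Nat) : Int) from by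
    simp only [PySem.List.clampIdx]
    split_ifs <;> omega]
  simp only [lt_self_iff_false, if_false]
  rw [if_neg (by
    intro hc
    have := Int.natCast_nonneg (PySem.List.clampIdx es.length b)
    omega)]
  rw [Int.toNat_natCast, show (Int.toNat 0) = 0 from rfl, List.drop_zero, rfind_char]
  cases (nlIdxs (es.take (PySem.List.clampIdx es.length b))).getLast? with
  | none => simp
  | some k => simp

theorem findFrom_clamp (es : List Char) (b : Int) :
    PySem.Chars.findFrom es ['\n'] b none =
      (((nlIdxs es).filter (fun k => decide (PySem.List.clampIdx es.length b ≤ k))).head?).elim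
        (-1 : Int) (fun na => (na : Int)) := by
  by_cases hb : (es.length : Int) < b
  · -- start past the end: find fails, and the clamped filter is empty
    have hcl : PySem.List.clampIdx es.length b = es.length := by
      simp only [PySem.List.clampIdx]
      split_ifs <;> omega
    have hf : (nlIdxs es).filter (fun k => decide (PySem.List.clampIdx es.length b ≤ k)) = [] := by
      rw [List.filter_eq_nil_iff]
      intro a ha
      have : a < es.length := (List.getElem?_eq_some_iff.mp ((mem_nlIdxs es a).mp ha)).1
      rw [hcl]
      simp
      omega
    rw [hf]
    simp only [PySem.Chars.findFrom]
    rw [if_pos (by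
      split_ifs <;> omega)]
    rfl
  · have hst : (if b < 0 then (if b + (es.length : Int) < 0 then 0 else b + ↑es.length) else b)
        = ((PySem.List.clampIdx es.length b : Nat) : Int) := by
      simp only [PySem.List.clampIdx]
      split_ifs <;> omega
    simp only [PySem.Chars.findFrom]
    rw [hst]
    rw [if_neg (by
      intro hc
      have h1 := PySem.List.clampIdx_le es.length b
      omega)]
    rw [Int.toNat_natCast, show (Int.toNat (es.length : Int)) = es.length from by omega,
      List.take_length, find_char, nlIdxs_drop, List.head?_map]
    cases hAf : ((nlIdxs es).filter (fun k => decide (PySem.List.clampIdx es.length b ≤ k))).head? with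
    | none => simp
    | some na =>
      have hna : PySem.List.clampIdx es.length b ≤ na := by
        have hmem : na ∈ (nlIdxs es).filter (fun k => decide (PySem.List.clampIdx es.length b ≤ k)) := by
          cases hL : (nlIdxs es).filter (fun k => decide (PySem.List.clampIdx es.length b ≤ k)) with
          | nil => rw [hL] at hAf; simp at hAf
          | cons a t =>
            rw [hL] at hAf
            simp at hAf
            exact List.mem_cons.mpr (Or.inl hAf.symm)
        simpa using List.of_mem_filter hmem
      simp only [Option.map_some, Option.elim_some]
      rw [if_neg (natCast_ne_neg_one (na - PySem.List.clampIdx es.length b)),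
        Nat.cast_sub hna]
      ring

theorem a_eq_core (source : String) (target : String) (i1 : Int) (i2 : Int) (j1 : Int) :
    get_newlines_and_indent source target i1 i2 j1 =
      pvCore (PySem.List.slice target.toList none (some j1) ++
              PySem.List.slice source.toList (some i1) none)
        j1 (j1 + (i2 - i1)) (i2 - i1)
        (PySem.List.clampIdx (PySem.List.slice target.toList none (some j1) ++
              PySem.List.slice source.toList (some i1) none).length j1)
        (PySem.List.clampIdx (PySem.List.slice target.toList none (some j1) ++
              PySem.List.slice source.toList (some i1) none).length (j1 + (i2 - i1))) := by
  simp only [get_newlines_and_indent, pvCore]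
  set es := PySem.List.slice target.toList none (some j1) ++
            PySem.List.slice source.toList (some i1) none with hes
  set K := nlIdxs es with hKdef
  set lon := PySem.List.clampIdx es.length j1 with hlon
  set hin := PySem.List.clampIdx es.length (j1 + (i2 - i1)) with hhin
  clear_value lon hin
  have hlo_le : lon ≤ es.length := hlon ▸ PySem.List.clampIdx_le es.length j1
  have hhi_le : hin ≤ es.length := hhin ▸ PySem.List.clampIdx_le es.length (j1 + (i2 - i1))
  -- the count over the window
  have hcount : PySem.Chars.count (PySem.List.slice es (some j1) (some (j1 + (i2 - i1)))) ['\n'] =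
      (K.filter (fun k => decide (lon ≤ k) && decide (k < hin))).length := by
    simp only [PySem.List.slice, ← hlon, ← hhin, count_char]
    by_cases hlh : lon ≤ hin
    · rw [seg_nlIdxs es lon hin hlh, List.length_map]
    · have h0 : hin - lon = 0 := by omega
      rw [h0]
      have hf : K.filter (fun k => decide (lon ≤ k) && decide (k < hin)) = [] := by
        rw [List.filter_eq_nil_iff]
        intro a ha
        simp only [Bool.and_eq_true, decide_eq_true_eq, not_and]
        omega
      rw [hf]
      rfl
  rw [hcount]
  set W := K.filter (fun k => decide (lon ≤ k) && decide (k < hin)) with hW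
  by_cases hz : W.length = 0
  · rw [if_pos (by exact_mod_cast hz), if_pos hz]
  · rw [if_neg (by exact_mod_cast hz), if_neg hz]
    have hWne : W ≠ [] := fun hc => hz (by rw [hc]; rfl)
    have hlh : lon ≤ hin := by
      obtain ⟨x, hx⟩ := List.exists_mem_of_ne_nil W hWne
      have := List.of_mem_filter hx
      simp only [Bool.and_eq_true, decide_eq_true_eq] at this
      omega
    obtain ⟨w, hw⟩ : ∃ w, W.getLast? = some w := by
      cases hWG : W.getLast? with
      | none => exact absurd (List.getLast?_eq_none_iff.mp hWG) hWne
      | some w => exact ⟨w, rfl⟩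
    have hsplit : K.filter (fun k => decide (k < hin)) =
        K.filter (fun k => decide (k < lon)) ++ W :=
      filter_lt_split (pairwise_nlIdxs es) hlh
    have hlast : PySem.Chars.rfindFrom es ['\n'] 0 (some (j1 + (i2 - i1))) = (w : Int) := by
      rw [rfindFrom_zero_clamp es _, nlIdxs_take, ← hKdef, ← hhin, hsplit,
        List.getLast?_append, hw]
      rfl
    have hrb : PySem.Chars.rfindFrom es ['\n'] 0 (some j1) =
        ((K.filter (fun k => decide (k < lon))).getLast?).elim (-1 : Int) (fun k => (k : Int)) := by
      rw [rfindFrom_zero_clamp es j1, nlIdxs_take, ← hKdef, ← hlon]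
    have hfa : PySem.Chars.findFrom es ['\n'] (j1 + (i2 - i1)) none =
        ((K.filter (fun k => decide (hin ≤ k))).head?).elim (-1 : Int) (fun na => (na : Int)) := by
      rw [findFrom_clamp es _, ← hKdef, ← hhin]
    rw [hlast, hrb, hfa]
    cases hB4 : (K.filter (fun k => decide (k < lon))).getLast? with
    | none =>
      cases hAf : (K.filter (fun k => decide (hin ≤ k))).head? with
      | none =>
        simp only [Option.elim_none, if_true]
        rw [PySem.List.slice_toNat es (by norm_num) (by positivity),
          show (Int.toNat 0) = 0 from rfl, Int.toNat_natCast]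
        rw [indent_eq es 0 es.length _ (by omega) (by omega)]
        rw [hw]
        simp only [Nat.cast_zero, Option.getD_some]
        try rw [← hKdef]
      | some na =>
        simp only [Option.elim_none, Option.elim_some, if_true]
        have hnaK : na ∈ K := List.mem_of_mem_filter (by
          cases hL : K.filter (fun k => decide (hin ≤ k)) with
          | nil => rw [hL] at hAf; simp at hAf
          | cons a t =>
            rw [hL] at hAf; simp at hAf; exact List.mem_cons.mpr (Or.inl hAf.symm))
        have hna : na < es.length := (List.getElem?_eq_some_iff.mp ((mem_nlIdxs es na).mp hnaK)).1
        rw [if_neg (natCast_ne_neg_one na)]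
        rw [PySem.List.slice_toNat es (by norm_num) (by positivity),
          show (Int.toNat 0) = 0 from rfl, Int.toNat_natCast]
        rw [indent_eq es 0 na _ (by omega) (by omega)]
        rw [hw]
        simp only [Nat.cast_zero, Option.getD_some]
        try rw [← hKdef]
    | some nb =>
      have hnb : nb < lon := by
        have hmem : nb ∈ K.filter (fun k => decide (k < lon)) := by
          have := List.getLast?_eq_some_iff.mp hB4
          obtain ⟨l', hl'⟩ := this
          rw [hl']
          exact List.mem_append.mpr (Or.inr List.mem_cons_self)
        simpa using List.of_mem_filter hmem
      cases hAf : (K.filter (fun k => decide (hin ≤ k))).head? with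
      | none =>
        simp only [Option.elim_none, Option.elim_some]
        rw [if_neg (natCast_ne_neg_one nb), if_neg (natCast_ne_neg_one nb)]
        simp only [if_true]
        rw [show ((nb : Int) + 1) = (((nb + 1 : Nat)) : Int) from by push_cast; ring]
        rw [PySem.List.slice_toNat es (by positivity) (by positivity),
          Int.toNat_natCast, Int.toNat_natCast]
        rw [indent_eq es (nb + 1) es.length _ (by omega) (by omega)]
        rw [hw]
        simp only [Option.getD_some]
        try rw [← hKdef]
        try push_cast
        try ring_nf
      | some na =>
        simp only [Option.elim_some]
        have hnaK : na ∈ K := List.mem_of_mem_filter (by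
          cases hL : K.filter (fun k => decide (hin ≤ k)) with
          | nil => rw [hL] at hAf; simp at hAf
          | cons a t =>
            rw [hL] at hAf; simp at hAf; exact List.mem_cons.mpr (Or.inl hAf.symm))
        have hna : na < es.length := (List.getElem?_eq_some_iff.mp ((mem_nlIdxs es na).mp hnaK)).1
        have hna3 : hin ≤ na := by
          have hmem2 : na ∈ K.filter (fun k => decide (hin ≤ k)) := by
            cases hL : K.filter (fun k => decide (hin ≤ k)) with
            | nil => rw [hL] at hAf; simp at hAf
            | cons a t =>
              rw [hL] at hAf; simp at hAf; exact List.mem_cons.mpr (Or.inl hAf.symm)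
          simpa using List.of_mem_filter hmem2
        rw [if_neg (natCast_ne_neg_one nb), if_neg (natCast_ne_neg_one nb),
          if_neg (natCast_ne_neg_one na)]
        rw [show ((nb : Int) + 1) = (((nb + 1 : Nat)) : Int) from by push_cast; ring]
        rw [PySem.List.slice_toNat es (by positivity) (by positivity),
          Int.toNat_natCast, Int.toNat_natCast]
        rw [indent_eq es (nb + 1) na _ (by omega) (by omega)]
        rw [hw]
        simp only [Option.getD_some]
        try rw [← hKdef]
        try push_cast
        try ring_nf

theorem b_eq_core (source : String) (target : String) (i1 : Int) (i2 : Int) (j1 : Int) :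
    get_newlines_and_indent_alt source target i1 i2 j1 =
      pvCore (PySem.List.slice target.toList none (some j1) ++
              PySem.List.slice source.toList (some i1) none)
        j1 (j1 + (i2 - i1)) (i2 - i1)
        (PySem.List.clampIdx (PySem.List.slice target.toList none (some j1) ++
              PySem.List.slice source.toList (some i1) none).length j1)
        (PySem.List.clampIdx (PySem.List.slice target.toList none (some j1) ++
              PySem.List.slice source.toList (some i1) none).length (j1 + (i2 - i1))) := by
  simp only [get_newlines_and_indent_alt, pvCore]
  set es := PySem.List.slice target.toList none (some j1) ++
            PySem.List.slice source.toList (some i1) none with hes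
  set K := nlIdxs es with hKdef
  set lon := PySem.List.clampIdx es.length j1 with hlon
  set hin := PySem.List.clampIdx es.length (j1 + (i2 - i1)) with hhin
  clear_value lon hin
  have hnls : ((PySem.List.enumerate es 0).filter (fun p => p.2 == '\n')).map Prod.fst =
      K.map (Nat.cast : Nat → Int) := by
    rw [enum_filter_nl es 0]
    apply List.map_congr_left
    intro b _
    simp
  rw [hnls]
  rw [filter_cast_range K lon hin]
  set W := K.filter (fun k => decide (lon ≤ k) && decide (k < hin)) with hW
  rw [List.length_map]
  by_cases hz : W.length = 0
  · rw [if_pos (by exact_mod_cast hz), if_pos hz]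
  · rw [if_neg (by exact_mod_cast hz), if_neg hz]
    have hWne : W.map (Nat.cast : Nat → Int) ≠ [] := by
      intro hc
      exact hz (by simpa using congrArg List.length hc)
    rw [pyGetD_neg_one _ hWne, List.getLast?_map, optmap_cast_getD]
    rw [filter_cast_lt K lon, filter_cast_ge K hin, List.getLast?_map, List.head?_map]
    cases hB4 : (K.filter (fun k => decide (k < lon))).getLast? with
    | none =>
      cases hAf : (K.filter (fun k => decide (hin ≤ k))).head? with
      | none =>
        simp only [Option.map_none]
        rw [← filter_cast_range K 0 es.length, List.foldl_filter]
        simp only [pvGStep]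
        push_cast
        rfl
      | some na =>
        simp only [Option.map_none, Option.map_some]
        rw [← filter_cast_range K 0 na, List.foldl_filter]
        simp only [pvGStep]
        push_cast
        rfl
    | some nb =>
      cases hAf : (K.filter (fun k => decide (hin ≤ k))).head? with
      | none =>
        simp only [Option.map_none, Option.map_some]
        rw [← filter_cast_range K (nb+1) es.length, List.foldl_filter]
        simp only [pvGStep]
        push_cast
        rfl
      | some na =>
        simp only [Option.map_some]
        rw [← filter_cast_range K (nb+1) na, List.foldl_filter]
        simp only [pvGStep]
        push_cast
        rfl

-- ===== VERDICT (by name: the statement is the Claim_ definition above) =====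
theorem get_newlines_and_indent_spec : Claim_equal_get_newlines_and_indent := by
  intro source target i1 i2 j1 _
  unfold Spec_get_newlines_and_indent
  rw [a_eq_core source target i1 i2 j1, b_eq_core source target i1 i2 j1]
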